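-- pv_equiv track=rewrite | github.com/zh3nl/Interesting-Problems | CodeSignal/Python/Array Iteration from Middle to Ends/Emerging from Center and Alternates Direction towards Both Ends/solution.py | iterateMiddleToEnd
-- ===== SOURCE A (Python) =====
-- def iterateMiddleToEnd(numbers):
--     mid = len(numbers) // 2 # The index of the left middle element
--     if len(numbers) % 2 == 1:
--         left = mid - 1 # The left to the middle element
--         right = mid + 1 # The right to the middle element
--         new_order = [numbers[mid]] # Adding the middle element to the resulting array
--     else:
--         left = mid - 1 # Left middle element
--         right = mid # Right middle element
--         new_order = [] # No elements in the resulting array for now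
--
--     while left >= 0 and right < len(numbers):
--         new_order.append(numbers[left])
--         new_order.append(numbers[right])
--         left -= 1
--         right += 1
--
--     return new_order
-- ===== SOURCE B (Python) =====
-- def iterateMiddleToEnd(numbers):
--     mid = len(numbers) // 2
--     odd = len(numbers) % 2 == 1
--     left_rev = numbers[:mid][::-1]
--     right = numbers[mid + 1:] if odd else numbers[mid:]
--     head = [numbers[mid]] if odd else []
--     return head + [v for pair in zip(left_rev, right) for v in pair]
-- ===== Notes on version B (the rewrite author's own statement) =====
-- stated objective: simpler
-- what changed: Replaces the outward two-pointer while loop with slice/reverse of the two halves and a zip interleave.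
import Mathlib
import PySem

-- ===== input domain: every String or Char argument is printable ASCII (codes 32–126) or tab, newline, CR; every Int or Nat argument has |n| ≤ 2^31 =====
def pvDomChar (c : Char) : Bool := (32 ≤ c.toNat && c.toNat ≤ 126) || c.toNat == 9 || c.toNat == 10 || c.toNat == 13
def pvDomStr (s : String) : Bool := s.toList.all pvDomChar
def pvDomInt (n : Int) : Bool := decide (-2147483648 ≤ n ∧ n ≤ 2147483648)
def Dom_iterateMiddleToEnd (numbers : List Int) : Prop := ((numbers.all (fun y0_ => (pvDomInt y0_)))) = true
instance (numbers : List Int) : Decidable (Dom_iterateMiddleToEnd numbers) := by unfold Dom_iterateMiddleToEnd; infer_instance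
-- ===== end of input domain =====

-- B replaces A's outward two-pointer while loop by slicing the two halves and interleaving them (objective: simpler).


-- ===== PORT A =====
-- the while loop: appends numbers[left], numbers[right] and moves the pointers outward
def iterMTELoop (numbers : List Int) (left right : Int) (acc : List Int) : List Int :=
  if _h : 0 ≤ left ∧ right < (numbers.length : Int) then
    iterMTELoop numbers (left - 1) (right + 1)
      (acc ++ [(PySem.List.pyGet? numbers left).getD 0, (PySem.List.pyGet? numbers right).getD 0])
  else
    acc
termination_by (left + 1).toNat
decreasing_by omega

def iterateMiddleToEnd (numbers : List Int) : List Int :=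
  let mid : Int := PySem.Int.floordiv (numbers.length : Int) 2
  if PySem.Int.mod (numbers.length : Int) 2 = 1 then
    iterMTELoop numbers (mid - 1) (mid + 1) [(PySem.List.pyGet? numbers mid).getD 0]
  else
    iterMTELoop numbers (mid - 1) mid []

-- ===== PORT B =====
-- [v for pair in zip(..) for v in pair]
def interleavePairs : List (Int × Int) → List Int
  | [] => []
  | (a, b) :: ps => a :: b :: interleavePairs ps

def iterateMiddleToEnd_alt (numbers : List Int) : List Int :=
  let mid : Int := PySem.Int.floordiv (numbers.length : Int) 2
  let odd : Prop := PySem.Int.mod (numbers.length : Int) 2 = 1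
  -- numbers[:mid][::-1]  ([::-1] is reverse: PySem.List.slice?_none_none_neg_one)
  let leftRev : List Int := (PySem.List.slice numbers none (some mid)).reverse
  let right : List Int :=
    if odd then PySem.List.slice numbers (some (mid + 1)) none
    else PySem.List.slice numbers (some mid) none
  let head : List Int := if odd then [(PySem.List.pyGet? numbers mid).getD 0] else []
  head ++ interleavePairs (leftRev.zip right)

-- ===== PRECONDITION & SPEC =====
def Spec_iterateMiddleToEnd (numbers : List Int) (out : List Int) : Prop := out = iterateMiddleToEnd_alt numbers
instance (numbers : List Int) (out : List Int) : Decidable (Spec_iterateMiddleToEnd numbers out) := by unfold Spec_iterateMiddleToEnd; infer_instance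

-- ===== CLAIM (what is proved, stated in full; the proofs are below) =====
def Claim_equal_iterateMiddleToEnd : Prop := ∀ (numbers : List Int), Dom_iterateMiddleToEnd numbers → Spec_iterateMiddleToEnd numbers (iterateMiddleToEnd numbers)

-- ===== LEMMAS AND PROOFS =====

-- the loop, started at (l, r), produces acc ++ interleave of (prefix up to l, reversed) with (suffix from r)
lemma iterMTELoop_eq (numbers : List Int) :
    ∀ (k : Nat) (l r : Int) (acc : List Int), (l + 1).toNat = k →
      l < (numbers.length : Int) → 0 ≤ r →
      iterMTELoop numbers l r acc =
        acc ++ interleavePairs (((numbers.take (l + 1).toNat).reverse).zip (numbers.drop r.toNat)) := by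
  intro k
  induction k with
  | zero =>
    intro l r acc hk hl hr
    rw [iterMTELoop, dif_neg (by omega)]
    simp [hk, interleavePairs]
  | succ k ih =>
    intro l r acc hk hl hr
    rw [iterMTELoop]
    by_cases h : 0 ≤ l ∧ r < (numbers.length : Int)
    · rw [dif_pos h]
      have hlnat : l.toNat < numbers.length := by omega
      have hrnat : r.toNat < numbers.length := by omega
      rw [ih (l - 1) (r + 1) _ (by omega) (by omega) (by omega)]
      have htake : (numbers.take (l + 1).toNat).reverse =
          numbers[l.toNat] :: (numbers.take (l - 1 + 1).toNat).reverse := by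
        have h1 : (l + 1).toNat = l.toNat + 1 := by omega
        have h2 : (l - 1 + 1).toNat = l.toNat := by omega
        rw [h1, h2, List.take_add_one]
        simp [List.getElem?_eq_getElem hlnat]
      have hdrop : numbers.drop r.toNat = numbers[r.toNat] :: numbers.drop (r + 1).toNat := by
        have h1 : (r + 1).toNat = r.toNat + 1 := by omega
        rw [h1]
        exact List.drop_eq_getElem_cons hrnat
      rw [htake, hdrop]
      rw [PySem.List.pyGet?_eq_some_getElem numbers h.1 hl,
          PySem.List.pyGet?_eq_some_getElem numbers hr h.2]
      simp [interleavePairs]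
    · rw [dif_neg h]
      have hge : numbers.length ≤ r.toNat := by omega
      simp [List.drop_eq_nil_of_le hge, interleavePairs]

theorem iterateMiddleToEnd_eq_alt (numbers : List Int) :
    iterateMiddleToEnd numbers = iterateMiddleToEnd_alt numbers := by
  have hfd : PySem.Int.floordiv (numbers.length : Int) 2 = ((numbers.length / 2 : Nat) : Int) := by
    rw [PySem.Int.floordiv_eq_ediv_of_pos (by norm_num)]; omega
  have hmd : PySem.Int.mod (numbers.length : Int) 2 = ((numbers.length % 2 : Nat) : Int) := by
    rw [PySem.Int.mod_eq_emod_of_pos (by norm_num)]; omega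
  have hm2 : numbers.length / 2 ≤ numbers.length := Nat.div_le_self _ _
  unfold iterateMiddleToEnd iterateMiddleToEnd_alt
  rw [hfd, hmd]
  dsimp only
  by_cases hodd : numbers.length % 2 = 1
  · have hlen : 1 ≤ numbers.length := by omega
    have hmidlt : numbers.length / 2 < numbers.length := Nat.div_lt_self (by omega) (by omega)
    rw [if_pos (by exact_mod_cast hodd), if_pos (by exact_mod_cast hodd),
        if_pos (by exact_mod_cast hodd)]
    rw [iterMTELoop_eq numbers (numbers.length / 2)
      ((numbers.length / 2 : Nat) - 1) ((numbers.length / 2 : Nat) + 1) _ (by omega)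
      (by omega) (by omega)]
    have ht1 : (((numbers.length / 2 : Nat) : Int) - 1 + 1).toNat = numbers.length / 2 := by omega
    have ht2 : (((numbers.length / 2 : Nat) : Int) + 1).toNat = numbers.length / 2 + 1 := by omega
    rw [ht1, ht2, PySem.List.slice_to_natCast]
    have : ((numbers.length / 2 : Nat) : Int) + 1 = (((numbers.length / 2 + 1 : Nat)) : Int) := by push_cast; ring
    rw [this, PySem.List.slice_from_natCast]
  · rw [if_neg (by exact_mod_cast hodd), if_neg (by exact_mod_cast hodd),
        if_neg (by exact_mod_cast hodd)]
    rw [iterMTELoop_eq numbers (numbers.length / 2)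
      ((numbers.length / 2 : Nat) - 1) ((numbers.length / 2 : Nat)) _ (by omega)
      (by omega)
      (by omega)]
    have ht1 : (((numbers.length / 2 : Nat) : Int) - 1 + 1).toNat = numbers.length / 2 := by omega
    have ht2 : ((numbers.length / 2 : Nat) : Int).toNat = numbers.length / 2 := by omega
    rw [ht1, ht2, PySem.List.slice_to_natCast, PySem.List.slice_from_natCast]

-- ===== VERDICT (by name: the statement is the Claim_ definition above) =====
theorem iterateMiddleToEnd_spec : Claim_equal_iterateMiddleToEnd := by
  intro numbers _
  unfold Spec_iterateMiddleToEnd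
  exact iterateMiddleToEnd_eq_alt numbers
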